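-- pv_equiv track=rewrite | github.com/a-maksimov/stepik_python_generation_professional | generators_with_previous.py | with_previous
-- ===== SOURCE A (Python) =====
-- def with_previous(iterable):
--     iterable = iter(iterable)
--     counter = 0
--     for item in iterable:
--         if counter == 0:
--             yield item, None
--             elem = item
--             counter += 1
--         else:
--             yield item, elem
--             elem = item
--             counter += 1
-- ===== SOURCE B (Python) =====
-- def with_previous(iterable):
--     items = list(iterable)
--     prevs = [None] + items[:-1]
--     yield from zip(items, prevs)
-- ===== Notes on version B (the rewrite author's own statement) =====
-- stated objective: idiomatic
-- what changed: Replaces A's carried-state generator loop (counter + previous element) with a two-phase build-then-zip: materialize the input, prepend None to the list minus its last element, and zip; identical tuples in identical order, but B materializes the input so it is not lazy on infinite iterables.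
import Mathlib
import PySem

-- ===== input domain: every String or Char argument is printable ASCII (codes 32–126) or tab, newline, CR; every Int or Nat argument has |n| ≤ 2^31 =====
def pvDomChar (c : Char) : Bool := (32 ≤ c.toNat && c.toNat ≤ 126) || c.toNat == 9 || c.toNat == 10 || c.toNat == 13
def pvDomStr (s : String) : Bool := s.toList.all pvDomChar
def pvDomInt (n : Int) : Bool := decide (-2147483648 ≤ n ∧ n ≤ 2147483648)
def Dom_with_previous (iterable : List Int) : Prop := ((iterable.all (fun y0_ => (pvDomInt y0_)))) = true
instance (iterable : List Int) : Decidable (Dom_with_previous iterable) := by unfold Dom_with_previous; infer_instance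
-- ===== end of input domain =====

-- B replaces A's carried-state loop with build-then-zip (idiomatic); return values proved equal on all
-- finite lists (the List model is finite, so A's laziness on infinite iterables is out of scope).

-- ===== PORT A =====
-- A's generator loop: carries a counter and the previous element; first iteration yields (item, None).
def with_previous_go (l : List Int) (counter : Int) (elem : Option Int) : List (Int × Option Int) :=
  match l with
  | [] => []
  | item :: rest =>
      if counter == 0 then
        (item, none) :: with_previous_go rest (counter + 1) (some item)
      else
        (item, elem) :: with_previous_go rest (counter + 1) (some item)

def with_previous (iterable : List Int) : List (Int × Option Int) :=
  with_previous_go iterable 0 none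

-- ===== PORT B =====
-- B: items = list(iterable); prevs = [None] + items[:-1]; zip(items, prevs).
def with_previous_alt (iterable : List Int) : List (Int × Option Int) :=
  iterable.zip (none :: (PySem.List.slice iterable none (some (-1))).map some)

-- ===== PRECONDITION & SPEC =====
def Spec_with_previous (iterable : List Int) (out : List (Int × Option Int)) : Prop := out = with_previous_alt iterable
instance (iterable : List Int) (out : List (Int × Option Int)) : Decidable (Spec_with_previous iterable out) := by unfold Spec_with_previous; infer_instance

-- ===== CLAIM (what is proved, stated in full; the proofs are below) =====
def Claim_equal_with_previous : Prop := ∀ (iterable : List Int), Dom_with_previous iterable → Spec_with_previous iterable (with_previous iterable)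

-- ===== LEMMAS AND PROOFS =====

theorem slice_minus_one (l : List Int) :
    PySem.List.slice l none (some (-1)) = l.dropLast :=
  PySem.List.slice_to_neg_one l

theorem go_nonzero (l : List Int) (c : Int) (e : Option Int) (hc : 0 < c) :
    with_previous_go l c e = l.zip (e :: l.dropLast.map some) := by
  induction l generalizing c e with
  | nil => simp [with_previous_go]
  | cons x xs ih =>
    have : (c == 0) = false := by simp; omega
    rw [with_previous_go]
    simp only [this, Bool.false_eq_true, if_false]
    rw [ih (c + 1) (some x) (by omega)]
    cases xs <;> simp

-- ===== VERDICT (by name: the statement is the Claim_ definition above) =====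
theorem with_previous_spec : Claim_equal_with_previous := by
  intro l _
  show with_previous l = with_previous_alt l
  unfold with_previous with_previous_alt
  rw [slice_minus_one]
  cases l with
  | nil => rfl
  | cons x xs =>
    rw [with_previous_go]
    rw [if_pos (by decide), go_nonzero xs (0 + 1) (some x) (by omega)]
    cases xs <;> simp
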